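-- pv_equiv track=rewrite | github.com/eduardocerqueira/seeker | seeker/snippet/amusement_park.py | solve
-- ===== SOURCE A (Python) =====
-- def solve(n, m, times):
--     if n <= m:
--         return n
--
--     low = 1
--     high = max(times) * n
--
--     answer = 0
--
--     while low <= high:
--         mid = (low + high) // 2
--         count = 0
--         added_count = 0 # 시간이 mid일 때 탑승한 수
--
--         # 몇 명이 탈 수 있었는가 기록하기
--         # n명이 탈 수 있었다면
--
--         for time in times:
--             count += mid // time + 1  # mid초 까지 탑승한 인원 계산
--             if mid % time == 0:
--                 added_count += 1
--
--         if count >= n: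
--             high = mid - 1
--             if count - added_count + 1 <= n:
--                 # 정답 찾기
--                 for no in reversed(range(m)):
--                     time = times[no]
--                     if mid % time != 0:
--                         continue
--
--                     if count == n:
--                         answer = no + 1
--                         break
--
--                     count -= 1
--         else:
--             low = mid + 1
--
--     return answer
-- ===== SOURCE B (Python) =====
-- def solve(n, m, times):
--     # Direct event simulation: ride i boards at times 0, times[i], 2*times[i], ...
--     # Dispatch the earliest pending boarding n times (ties to the lowest ride
--     # index); the ride of the n-th dispatch is the answer.
--     if n <= m:
--         return n
--     nxt = [0] * m          # nxt[i] = next boarding time of ride i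
--     last = 0
--     for _ in range(n):
--         best = 0
--         for j in range(1, m):
--             if nxt[j] < nxt[best]:
--                 best = j
--         last = best
--         nxt[best] += times[best]
--     return last + 1
-- ===== Notes on version B (the rewrite author's own statement) =====
-- stated objective: alternative
-- what changed: A binary-searches the boarding time with a divisor re-scan embedded in every search iteration; B does no search at all: it simulates the boarding events directly, repeatedly dispatching the earliest pending ride (ties to the lowest index) n times and returning the ride of the n-th dispatch.
-- outside the precondition, e.g. on solve(7, 0, [4, 3]): A returns 0, B raises IndexError; on solve(9, 1, [5, 1, 3]): A returns 0, B returns 1; on solve(9, 4, [-3, 2, -3, 3]): A returns 0, B returns 1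
import Mathlib
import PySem

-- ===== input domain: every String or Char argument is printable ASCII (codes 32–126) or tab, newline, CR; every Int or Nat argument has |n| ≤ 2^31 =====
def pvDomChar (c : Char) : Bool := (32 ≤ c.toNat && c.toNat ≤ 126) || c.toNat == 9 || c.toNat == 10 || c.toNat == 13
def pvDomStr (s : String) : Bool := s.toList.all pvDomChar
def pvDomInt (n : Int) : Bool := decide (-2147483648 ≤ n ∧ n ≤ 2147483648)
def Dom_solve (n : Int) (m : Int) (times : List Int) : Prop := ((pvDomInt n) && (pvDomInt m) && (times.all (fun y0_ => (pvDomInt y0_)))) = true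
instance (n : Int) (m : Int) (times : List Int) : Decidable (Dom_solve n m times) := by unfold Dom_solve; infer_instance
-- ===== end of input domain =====

-- B replaces A's binary search on time (with an embedded reversed answer scan) by a
-- direct discrete-event simulation: dispatch the earliest pending boarding n times.

-- ===== PORT A =====
-- the inner 'for no in reversed(range(m))' loop; returns some answer on break, none if it runs out
def solveAScan (times : List Int) (mid : Int) (nval : Int) : List Int → Int → Option Int
  | [], _ => none
  | no :: rest, count =>
    -- times[no]: Python raises IndexError out of range; such inputs are outside Pre_solve
    let time := PySem.List.pyGetD times no 0
    if ¬ (PySem.Int.mod mid time = 0) then solveAScan times mid nval rest count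
    else if count = nval then some (no + 1)
    else solveAScan times mid nval rest (count - 1)

-- the 'while low <= high' loop, state (low, high, answer)
def solveALoop (nval m : Int) (times : List Int) (low high answer : Int) : Int :=
  if _h : low ≤ high then
    let mid := PySem.Int.floordiv (low + high) 2
    let ca := times.foldl
      (fun p time => (p.1 + PySem.Int.floordiv mid time + 1,
                      if PySem.Int.mod mid time = 0 then p.2 + 1 else p.2)) ((0:Int), (0:Int))
    if nval ≤ ca.1 then
      let answer' :=
        if ca.1 - ca.2 + 1 ≤ nval then
          (solveAScan times mid nval (PySem.List.pyRange 0 m 1).reverse ca.1).getD answer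
        else answer
      solveALoop nval m times low (mid - 1) answer'
    else solveALoop nval m times (mid + 1) high answer
  else answer
termination_by (high + 1 - low).toNat
decreasing_by
  · have := PySem.Int.floordiv_two_mid_bounds (lo := low) (hi := high) _h; omega
  · have := PySem.Int.floordiv_two_mid_bounds (lo := low) (hi := high) _h; omega

def solve (n : Int) (m : Int) (times : List Int) : Int :=
  if n ≤ m then n
  else
    -- max(times): Python raises ValueError on []; such inputs are outside Pre_solve
    let high := (PySem.List.max? times (fun y => y)).getD 0 * n
    solveALoop n m times 1 high 0

-- ===== PORT B =====
-- 'best = 0; for j in range(1, m): if nxt[j] < nxt[best]: best = j'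
def altBest (nxt : List Int) (m : Int) : Int :=
  (PySem.List.pyRange 1 m 1).foldl
    (fun best j => if PySem.List.pyGetD nxt j 0 < PySem.List.pyGetD nxt best 0 then j else best) 0

-- one iteration of the simulation loop: pick the earliest ride, advance it; state (nxt, last)
def altStep (times : List Int) (m : Int) (st : List Int × Int) : List Int × Int :=
  let best := altBest st.1 m
  (PySem.List.pySetD st.1 best
      (PySem.List.pyGetD st.1 best 0 + PySem.List.pyGetD times best 0), best)

def solve_alt (n : Int) (m : Int) (times : List Int) : Int :=
  if n ≤ m then n
  else
    ((PySem.List.pyRange 0 n 1).foldl (fun st _ => altStep times m st)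
        (List.replicate m.toNat 0, 0)).2 + 1

-- ===== PRECONDITION & SPEC =====
-- Pre_ excludes only inputs outside the problem's shape when the search runs (n > m):
-- m not equal to len(times) — A's answer scan indexes times[0..m-1] (IndexError when
-- m > len, and when m < len A counts boardings of rides its own scan never returns) —
-- an empty times (max() raises ValueError), and non-positive ride periods (time = 0
-- raises ZeroDivisionError, time < 0 yields garbage from floor division).
def Pre_solve (n : Int) (m : Int) (times : List Int) : Prop :=
  n ≤ m ∨ (m = (times.length : Int) ∧ times ≠ [] ∧ ∀ t ∈ times, 1 ≤ t)
instance (n : Int) (m : Int) (times : List Int) : Decidable (Pre_solve n m times) := by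
  unfold Pre_solve; infer_instance

def pvWitness_solve : Int × Int × List Int := (5, 3, [1, 2, 3])

def Spec_solve (n : Int) (m : Int) (times : List Int) (out : Int) : Prop := out = solve_alt n m times
instance (n : Int) (m : Int) (times : List Int) (out : Int) : Decidable (Spec_solve n m times out) := by
  unfold Spec_solve; infer_instance

-- ===== CLAIM (what is proved, stated in full; the proofs are below) =====
def Claim_equal_solve : Prop := ∀ (n : Int) (m : Int) (times : List Int),
  Dom_solve n m times → Pre_solve n m times → Spec_solve n m times (solve n m times)

-- ===== LEMMAS AND PROOFS =====

-- capacity: number of boardings in [0, t] (proof-side characterisation used for both ports)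
def altCapacity (times : List Int) (t : Int) : Int :=
  times.foldl (fun c u => c + (PySem.Int.floordiv t u + 1)) 0

-- number of rides boarding exactly at time t
def addedCnt (times : List Int) (t : Int) : Int :=
  (times.countP (fun u => decide (PySem.Int.mod t u = 0)) : Int)

-- forward scan returning the r-th ride boarding at time tt (proof-side value of both ports)
def pickScan (tt : Int) : List Int → Int → Int → Int
  | [], _, _ => 0
  | u :: rest, i, r =>
    if PySem.Int.mod tt u = 0 then
      if r - 1 = 0 then i + 1 else pickScan tt rest (i + 1) (r - 1)
    else pickScan tt rest (i + 1) r

-- forward pick of the r-th matching pair (pickScan over enumerated pairs)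
def pick (tt : Int) : List (Int × Int) → Int → Int
  | [], _ => 0
  | (i, u) :: rest, r =>
    if PySem.Int.mod tt u = 0 then
      if r - 1 = 0 then i + 1 else pick tt rest (r - 1)
    else pick tt rest r

-- reversed scan over enumerated pairs (proof-side mirror of solveAScan)
def scanP (tt nval : Int) : List (Int × Int) → Int → Option Int
  | [], _ => none
  | (i, u) :: rest, count =>
    if ¬ (PySem.Int.mod tt u = 0) then scanP tt nval rest count
    else if count = nval then some (i + 1)
    else scanP tt nval rest (count - 1)

def mcnt (tt : Int) (el : List (Int × Int)) : Int :=
  (el.countP (fun p => decide (PySem.Int.mod tt p.2 = 0)) : Int)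

-- sum of f over indices 0..L-1
def idxSum (f : Nat → Int) (L : Nat) : Int := ((List.range L).map f).sum

-- k iterations of a step function (the shape of B's outer 'for _ in range(n)')
def runSim {S : Type} (g : S → S) : Nat → S → S
  | 0, st => st
  | k+1, st => runSim g k (g st)

-- the simulation invariant after j dispatches: nxt[i] = (#dispatches of ride i) * times[i],
-- every dispatched event precedes (lexicographically) every pending one, j dispatches total
def SimInv (ts : List Int) (j : Int) (nxt : List Int) : Prop :=
  nxt.length = ts.length ∧
  (∀ i, i < ts.length → 0 ≤ nxt.getD i 0 ∧ ts.getD i 0 ∣ nxt.getD i 0) ∧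
  (∀ i i', i < ts.length → i' < ts.length → ts.getD i' 0 ≤ nxt.getD i' 0 →
      nxt.getD i' 0 - ts.getD i' 0 < nxt.getD i 0 ∨
      (nxt.getD i' 0 - ts.getD i' 0 = nxt.getD i 0 ∧ i' < i)) ∧
  idxSum (fun i => nxt.getD i 0 / ts.getD i 0) ts.length = j

theorem foldl_add_shift (f : Int → Int) (l : List Int) (a : Int) :
    l.foldl (fun c u => c + f u) a = a + l.foldl (fun c u => c + f u) 0 := by
  induction l generalizing a with
  | nil => simp
  | cons x xs ih =>
    simp only [List.foldl_cons]
    rw [ih (a + f x), ih (0 + f x)]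
    ring

theorem altCapacity_cons (u : Int) (l : List Int) (t : Int) :
    altCapacity (u :: l) t = PySem.Int.floordiv t u + 1 + altCapacity l t := by
  unfold altCapacity
  simp only [List.foldl_cons]
  rw [foldl_add_shift (fun u => PySem.Int.floordiv t u + 1) l (0 + (PySem.Int.floordiv t u + 1))]
  ring

theorem fdiv_mono (u a b : Int) (hu : 1 ≤ u) (h : a ≤ b) :
    PySem.Int.floordiv a u ≤ PySem.Int.floordiv b u := by
  rw [PySem.Int.floordiv_eq_ediv_of_pos (by omega), PySem.Int.floordiv_eq_ediv_of_pos (by omega)]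
  exact Int.ediv_le_ediv (by omega) h

theorem altCapacity_mono (times : List Int) (hpos : ∀ t ∈ times, 1 ≤ t) (a b : Int) (h : a ≤ b) :
    altCapacity times a ≤ altCapacity times b := by
  induction times with
  | nil => simp [altCapacity]
  | cons u l ih =>
    rw [altCapacity_cons, altCapacity_cons]
    have h1 := fdiv_mono u a b (hpos u (by simp)) h
    have h2 := ih (fun t ht => hpos t (by simp [ht]))
    omega

theorem addedCnt_cons (u : Int) (l : List Int) (t : Int) :
    addedCnt (u :: l) t = (if PySem.Int.mod t u = 0 then 1 else 0) + addedCnt l t := by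
  unfold addedCnt
  rw [List.countP_cons]
  by_cases h : PySem.Int.mod t u = 0 <;> simp [h] <;> omega

theorem addedCnt_append (l1 l2 : List Int) (t : Int) :
    addedCnt (l1 ++ l2) t = addedCnt l1 t + addedCnt l2 t := by
  unfold addedCnt
  rw [List.countP_append]
  push_cast
  ring

theorem addedCnt_nonneg (l : List Int) (t : Int) : 0 ≤ addedCnt l t := by
  unfold addedCnt; positivity

theorem addedCnt_le_length (l : List Int) (t : Int) : addedCnt l t ≤ (l.length : Int) := by
  unfold addedCnt
  exact_mod_cast List.countP_le_length

theorem fdiv_pred (u t : Int) (hu : 1 ≤ u) :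
    PySem.Int.floordiv (t - 1) u
      = PySem.Int.floordiv t u - (if PySem.Int.mod t u = 0 then 1 else 0) := by
  rw [PySem.Int.floordiv_eq_ediv_of_pos (by omega), PySem.Int.floordiv_eq_ediv_of_pos (by omega),
      PySem.Int.mod_eq_emod_of_pos (by omega)]
  have h0 : 0 ≤ t % u := Int.emod_nonneg t (by omega)
  have h1 : t % u < u := Int.emod_lt_of_pos t (by omega)
  have ht : u * (t / u) + t % u = t := Int.mul_ediv_add_emod t u
  split_ifs with h
  · have he : t - 1 = (u - 1) + (t / u - 1) * u := by linear_combination h - ht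
    rw [he, Int.add_mul_ediv_right _ _ (by omega : u ≠ 0),
        Int.ediv_eq_zero_of_lt (by omega) (by omega)]
    ring
  · have he : t - 1 = (t % u - 1) + (t / u) * u := by linear_combination -ht
    rw [he, Int.add_mul_ediv_right _ _ (by omega : u ≠ 0),
        Int.ediv_eq_zero_of_lt (by omega) (by omega)]
    ring

theorem altCapacity_pred (times : List Int) (hpos : ∀ t ∈ times, 1 ≤ t) (t : Int) :
    altCapacity times (t - 1) = altCapacity times t - addedCnt times t := by
  induction times with
  | nil => simp [altCapacity, addedCnt]
  | cons u l ih =>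
    rw [altCapacity_cons, altCapacity_cons, addedCnt_cons,
        fdiv_pred u t (hpos u (by simp)), ih (fun x hx => hpos x (by simp [hx]))]
    split_ifs <;> omega

theorem countAdded_fold_aux (times : List Int) (mid : Int) :
    ∀ c a : Int,
      times.foldl
        (fun p time => (p.1 + PySem.Int.floordiv mid time + 1,
                        if PySem.Int.mod mid time = 0 then p.2 + 1 else p.2)) (c, a)
        = (c + altCapacity times mid, a + addedCnt times mid) := by
  induction times with
  | nil => intro c a; simp [altCapacity, addedCnt]
  | cons u l ih =>
    intro c a
    simp only [List.foldl_cons]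
    rw [ih]
    rw [altCapacity_cons, addedCnt_cons]
    by_cases h : PySem.Int.mod mid u = 0 <;> simp [h, Prod.ext_iff] <;> omega

theorem countAdded_fold (times : List Int) (mid : Int) :
    times.foldl
      (fun p time => (p.1 + PySem.Int.floordiv mid time + 1,
                      if PySem.Int.mod mid time = 0 then p.2 + 1 else p.2)) ((0:Int), (0:Int))
      = (altCapacity times mid, addedCnt times mid) := by
  rw [countAdded_fold_aux]
  simp

theorem fdiv_nonneg' (a u : Int) (ha : 0 ≤ a) (hu : 1 ≤ u) :
    0 ≤ PySem.Int.floordiv a u := by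
  rw [PySem.Int.floordiv_eq_ediv_of_pos (by omega)]
  exact Int.ediv_nonneg ha (by omega)

theorem altCapacity_nonneg (times : List Int) (hpos : ∀ t ∈ times, 1 ≤ t) (t : Int)
    (ht : 0 ≤ t) : 0 ≤ altCapacity times t := by
  induction times with
  | nil => simp [altCapacity]
  | cons u l ih =>
    rw [altCapacity_cons]
    have := fdiv_nonneg' t u ht (hpos u (by simp))
    have := ih (fun x hx => hpos x (by simp [hx]))
    omega

theorem altCapacity_lower (times : List Int) (hpos : ∀ t ∈ times, 1 ≤ t)
    (v : Int) (hv : v ∈ times) (nv : Int) (h0 : 0 ≤ v * nv) :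
    PySem.Int.floordiv (v * nv) v + 1 ≤ altCapacity times (v * nv) := by
  induction times with
  | nil => simp at hv
  | cons u l ih =>
    rw [altCapacity_cons]
    rcases List.mem_cons.mp hv with h | h
    · subst h
      have := altCapacity_nonneg l (fun x hx => hpos x (by simp [hx])) (v * nv) h0
      omega
    · have h1 := ih (fun x hx => hpos x (by simp [hx])) h
      have h2 := fdiv_nonneg' (v * nv) u h0 (hpos u (by simp))
      omega

theorem pickScan_pick (tt : Int) (l : List Int) (i r : Int) :
    pickScan tt l i r = pick tt (PySem.List.enumerate l i) r := by
  induction l generalizing i r with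
  | nil => simp [pickScan, PySem.List.enumerate_nil, pick]
  | cons u rest ih =>
    rw [PySem.List.enumerate_cons]
    simp only [pickScan, pick]
    by_cases h : PySem.Int.mod tt u = 0 <;> simp [h, ih]

theorem mcnt_cons (tt : Int) (i u : Int) (el : List (Int × Int)) :
    mcnt tt ((i, u) :: el) = (if PySem.Int.mod tt u = 0 then 1 else 0) + mcnt tt el := by
  unfold mcnt
  rw [List.countP_cons]
  by_cases h : PySem.Int.mod tt u = 0 <;> simp [h] <;> omega

theorem mcnt_nonneg (tt : Int) (el : List (Int × Int)) : 0 ≤ mcnt tt el := by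
  unfold mcnt; positivity

theorem pick_append_le (tt : Int) (el l2 : List (Int × Int)) (r : Int)
    (h1 : 1 ≤ r) (h2 : r ≤ mcnt tt el) : pick tt (el ++ l2) r = pick tt el r := by
  induction el generalizing r with
  | nil => simp [mcnt] at h2; omega
  | cons p rest ih =>
    obtain ⟨i, u⟩ := p
    rw [mcnt_cons] at h2
    simp only [List.cons_append, pick]
    by_cases h : PySem.Int.mod tt u = 0
    · simp only [if_pos h]
      by_cases hr : r - 1 = 0
      · simp [hr]
      · simp only [if_neg hr]
        exact ih (r - 1) (by omega) (by simp [h] at h2; omega)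
    · simp only [if_neg h]
      exact ih r h1 (by simp [h] at h2; omega)

theorem pick_append_last (tt : Int) (el : List (Int × Int)) (i u : Int)
    (hu : PySem.Int.mod tt u = 0) :
    pick tt (el ++ [(i, u)]) (mcnt tt el + 1) = i + 1 := by
  induction el with
  | nil => simp [mcnt, pick, hu]
  | cons p rest ih =>
    obtain ⟨j, v⟩ := p
    rw [mcnt_cons]
    simp only [List.cons_append, pick]
    have hnn := mcnt_nonneg tt rest
    by_cases h : PySem.Int.mod tt v = 0
    · simp only [if_pos h]
      rw [if_neg (by omega)]
      have e : 1 + mcnt tt rest + 1 - 1 = mcnt tt rest + 1 := by ring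
      rw [e, ih]
    · simp only [if_neg h]
      have e : (0:Int) + mcnt tt rest + 1 = mcnt tt rest + 1 := by ring
      rw [e, ih]

theorem pick_append_mid (tt : Int) (el rest : List (Int × Int)) (i u : Int)
    (hu : PySem.Int.mod tt u = 0) :
    pick tt (el ++ (i, u) :: rest) (mcnt tt el + 1) = i + 1 := by
  induction el with
  | nil =>
    simp only [List.nil_append, pick, if_pos hu]
    rw [if_pos (by unfold mcnt; simp)]
  | cons p el' ih =>
    obtain ⟨j, v⟩ := p
    rw [mcnt_cons]
    simp only [List.cons_append, pick]
    have hnn := mcnt_nonneg tt el'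
    by_cases h : PySem.Int.mod tt v = 0
    · simp only [if_pos h]
      rw [if_neg (by omega)]
      have e : 1 + mcnt tt el' + 1 - 1 = mcnt tt el' + 1 := by ring
      rw [e, ih]
    · simp only [if_neg h]
      have e : (0:Int) + mcnt tt el' + 1 = mcnt tt el' + 1 := by ring
      rw [e, ih]

theorem mcnt_append_singleton (tt : Int) (el : List (Int × Int)) (i u : Int) :
    mcnt tt (el ++ [(i, u)])
      = mcnt tt el + (if PySem.Int.mod tt u = 0 then 1 else 0) := by
  unfold mcnt
  rw [List.countP_append]
  by_cases h : PySem.Int.mod tt u = 0 <;> simp [h]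

theorem scanP_main (tt nval : Int) (el : List (Int × Int)) (count r : Int)
    (hc : count - nval = mcnt tt el - r) (h1 : 1 ≤ r) (h2 : r ≤ mcnt tt el) :
    scanP tt nval el.reverse count = some (pick tt el r) := by
  induction el using List.reverseRecOn generalizing count r with
  | nil => simp [mcnt] at h2; omega
  | append_singleton el' x ih =>
    obtain ⟨i, u⟩ := x
    rw [mcnt_append_singleton] at hc h2
    rw [List.reverse_append, List.reverse_singleton, List.singleton_append]
    simp only [scanP]
    by_cases h : PySem.Int.mod tt u = 0
    · simp only [if_pos h] at hc h2
      rw [if_neg (by simp [h])]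
      by_cases hcn : count = nval
      · rw [if_pos hcn]
        have hr : r = mcnt tt el' + 1 := by omega
        rw [hr, pick_append_last tt el' i u h]
      · rw [if_neg hcn]
        have h2' : r ≤ mcnt tt el' := by omega
        rw [ih (count - 1) r (by omega) h1 h2', pick_append_le tt el' [(i, u)] r h1 h2']
    · simp only [if_neg h] at hc h2
      rw [if_pos (by simp [h])]
      have h2' : r ≤ mcnt tt el' := by omega
      rw [ih count r (by omega) h1 h2', pick_append_le tt el' [(i, u)] r h1 h2']

theorem scanA_scanP (times : List Int) (tt nval : Int) (k : Nat) (hk : k ≤ times.length)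
    (count : Int) :
    solveAScan times tt nval (PySem.List.pyRange 0 (k : Int) 1).reverse count
      = scanP tt nval (PySem.List.enumerate (times.take k) 0).reverse count := by
  induction k generalizing count with
  | zero =>
    rw [PySem.List.pyRange_one_eq_nil (by omega)]
    simp [solveAScan, PySem.List.enumerate_nil, scanP]
  | succ k ih =>
    have hk' : k < times.length := by omega
    have hr : PySem.List.pyRange 0 ((k : Int) + 1) 1
        = PySem.List.pyRange 0 (k : Int) 1 ++ [(k : Int)] :=
      PySem.List.pyRange_one_succ_right (by omega)
    have htake : times.take (k + 1) = times.take k ++ [times[k]] := by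
      rw [List.take_add_one, List.getElem?_eq_getElem hk']
      simp
    have hcast : ((k + 1 : Nat) : Int) = (k : Int) + 1 := by push_cast; ring
    rw [hcast, hr, htake, PySem.List.enumerate_append]
    have hlen : ((times.take k).length : Int) = (k : Int) := by
      simp [List.length_take]; omega
    rw [hlen]
    simp only [List.reverse_append, List.reverse_singleton, List.singleton_append,
      PySem.List.enumerate_cons, PySem.List.enumerate_nil]
    simp only [solveAScan, scanP]
    have hget : PySem.List.pyGetD times (k : Int) 0 = times[k] := by
      rw [PySem.List.pyGetD_eq_getElem times 0 (by omega) (by exact_mod_cast hk')]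
      simp
    rw [hget]
    by_cases h : PySem.Int.mod tt times[k] = 0
    · simp only [if_neg (by simp [h] : ¬¬PySem.Int.mod tt times[k] = 0)]
      by_cases hcn : count = nval
      · rw [if_pos hcn, if_pos hcn]
        simp
      · rw [if_neg hcn, if_neg hcn, ih (by omega) (count - 1)]
    · simp only [if_pos (by simp [h] : ¬PySem.Int.mod tt times[k] = 0)]
      exact ih (by omega) count

theorem mcnt_enumerate (tt : Int) (l : List Int) (s : Int) :
    mcnt tt (PySem.List.enumerate l s) = addedCnt l tt := by
  induction l generalizing s with
  | nil => simp [mcnt, addedCnt, PySem.List.enumerate_nil]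
  | cons u rest ih =>
    rw [PySem.List.enumerate_cons, mcnt_cons, addedCnt_cons, ih (s + 1)]

theorem loopA_correct (nval : Int) (times : List Int)
    (hpos : ∀ t ∈ times, 1 ≤ t)
    (T : Int) (hPT : nval ≤ altCapacity times T)
    (hPT' : altCapacity times (T - 1) < nval) :
    ∀ low high answer, low ≤ T →
      (T ≤ high ∨ answer = pickScan T times 0 (nval - altCapacity times (T - 1))) →
      solveALoop nval (times.length : Int) times low high answer
        = pickScan T times 0 (nval - altCapacity times (T - 1)) := by
  have key : ∀ meas : Nat, ∀ low high answer, (high + 1 - low).toNat ≤ meas →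
      low ≤ T →
      (T ≤ high ∨ answer = pickScan T times 0 (nval - altCapacity times (T - 1))) →
      solveALoop nval (times.length : Int) times low high answer
        = pickScan T times 0 (nval - altCapacity times (T - 1)) := by
    intro meas
    induction meas with
    | zero =>
      intro low high answer hle hlow hdisj
      have hnl : ¬ low ≤ high := by omega
      rw [solveALoop, dif_neg hnl]
      rcases hdisj with h | h
      · exfalso; omega
      · exact h
    | succ meas ih =>
      intro low high answer hle hlow hdisj
      by_cases hlh : low ≤ high
      · rw [solveALoop, dif_pos hlh]
        simp only [countAdded_fold]
        obtain ⟨hm1, hm2⟩ := PySem.Int.floordiv_two_mid_bounds hlh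
        set mid := PySem.Int.floordiv (low + high) 2 with hmid
        by_cases hcount : nval ≤ altCapacity times mid
        · have hTmid : T ≤ mid := by
            by_contra hc
            have := altCapacity_mono times hpos mid (T - 1) (by omega)
            omega
          rw [if_pos hcount]
          have hpred := altCapacity_pred times hpos mid
          by_cases heq : mid = T
          · have hcond : altCapacity times mid - addedCnt times mid + 1 ≤ nval := by
              rw [heq] at hpred ⊢; omega
            rw [if_pos hcond]
            have hscan : solveAScan times mid nval
                  (PySem.List.pyRange 0 ((times.length : Nat) : Int) 1).reverse
                  (altCapacity times mid)
                = some (pickScan T times 0 (nval - altCapacity times (T - 1))) := by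
              rw [scanA_scanP times mid nval times.length le_rfl, List.take_length]
              rw [heq]
              have hpredT := altCapacity_pred times hpos T
              rw [scanP_main T nval (PySem.List.enumerate times 0)
                    (altCapacity times T) (nval - altCapacity times (T - 1))
                    (by rw [mcnt_enumerate]; omega) (by omega)
                    (by rw [mcnt_enumerate]; omega)]
              rw [pickScan_pick]
            rw [hscan]
            simp only [Option.getD_some]
            exact ih low (mid - 1) _ (by omega) hlow (Or.inr rfl)
          · have hTlt : T < mid := by omega
            have hcond : ¬ (altCapacity times mid - addedCnt times mid + 1 ≤ nval) := by
              have := altCapacity_mono times hpos T (mid - 1) (by omega)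
              omega
            rw [if_neg hcond]
            exact ih low (mid - 1) answer (by omega) hlow (Or.inl (by omega))
        · rw [if_neg hcount]
          have hmidT : mid < T := by
            by_contra hc
            have := altCapacity_mono times hpos T mid (by omega)
            omega
          exact ih (mid + 1) high answer (by omega) (by omega) hdisj
      · rw [solveALoop, dif_neg hlh]
        rcases hdisj with h | h
        · exfalso; omega
        · exact h
  intro low high answer hlow hdisj
  exact key (high + 1 - low).toNat low high answer le_rfl hlow hdisj

-- ---- B-side toolbox ----

theorem ediv_between (u q x : Int) (hu : 0 < u) (h1 : q * u ≤ x) (h2 : x < (q + 1) * u) :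
    x / u = q := by
  have h3 : x = (x - q * u) + q * u := by ring
  rw [h3, Int.add_mul_ediv_right _ _ (by omega : u ≠ 0),
      Int.ediv_eq_zero_of_lt (by linarith) (by linarith)]
  omega

theorem getD_set_lt (xs : List Int) (b i : Nat) (v : Int) (hb : b < xs.length) :
    (xs.set b v).getD i 0 = if i = b then v else xs.getD i 0 := by
  rw [List.getD_eq_getElem?_getD, List.getD_eq_getElem?_getD, List.getElem?_set]
  by_cases h : i = b
  · rw [if_pos h, if_pos h.symm, if_pos (h ▸ hb)]
    simp
  · rw [if_neg h, if_neg (fun hh => h hh.symm)]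

theorem getD_replicate_zero (L i : Nat) : (List.replicate L (0:Int)).getD i 0 = 0 := by
  rw [List.getD_eq_getElem?_getD, List.getElem?_replicate]
  split <;> rfl

theorem getD_take (ts : List Int) (b i : Nat) (hi : i < b) :
    (ts.take b).getD i 0 = ts.getD i 0 := by
  rw [List.getD_eq_getElem?_getD, List.getD_eq_getElem?_getD, List.getElem?_take, if_pos hi]

theorem idxSum_succ (f : Nat → Int) (k : Nat) : idxSum f (k + 1) = idxSum f k + f k := by
  unfold idxSum
  rw [List.range_succ, List.map_append, List.sum_append]
  simp

theorem idxSum_congr (f g : Nat → Int) (L : Nat) (h : ∀ i, i < L → f i = g i) :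
    idxSum f L = idxSum g L := by
  induction L with
  | zero => rfl
  | succ k ih =>
    rw [idxSum_succ, idxSum_succ, ih (fun i hi => h i (by omega)), h k (by omega)]

theorem idxSum_add (f g : Nat → Int) (L : Nat) :
    idxSum (fun i => f i + g i) L = idxSum f L + idxSum g L := by
  induction L with
  | zero => rfl
  | succ k ih => rw [idxSum_succ, idxSum_succ, idxSum_succ, ih]; ring

theorem idxSum_zero (f : Nat → Int) (L : Nat) (h : ∀ i, i < L → f i = 0) :
    idxSum f L = 0 := by
  rw [idxSum_congr f (fun _ => 0) L h]
  clear h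
  induction L with
  | zero => rfl
  | succ k ih => rw [idxSum_succ, ih]; ring

theorem idxSum_eq_of_zeros (f : Nat → Int) (b L : Nat) (hbL : b ≤ L)
    (h : ∀ i, b ≤ i → i < L → f i = 0) : idxSum f L = idxSum f b := by
  induction L with
  | zero => have : b = 0 := by omega
            rw [this]
  | succ k ih =>
    by_cases hbk : b = k + 1
    · rw [hbk]
    · rw [idxSum_succ, ih (by omega) (fun i h1 h2 => h i h1 (by omega)),
          h k (by omega) (by omega)]
      ring

theorem idxSum_ite_eq (b L : Nat) (hb : b < L) :
    idxSum (fun i => if i = b then (1:Int) else 0) L = 1 := by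
  rw [idxSum_eq_of_zeros _ (b + 1) L (by omega)
        (fun i h1 _ => by rw [if_neg (by omega)]),
      idxSum_succ, if_pos rfl,
      idxSum_zero _ b (fun i hi => by rw [if_neg (by omega)])]
  ring

theorem cap_idx (ts : List Int) (t : Int) :
    altCapacity ts t = idxSum (fun i => PySem.Int.floordiv t (ts.getD i 0) + 1) ts.length := by
  induction ts with
  | nil => rfl
  | cons u l ih =>
    rw [altCapacity_cons, ih]
    have : idxSum (fun i => PySem.Int.floordiv t ((u :: l).getD i 0) + 1) (l.length + 1)
        = idxSum (fun i => PySem.Int.floordiv t ((u :: l).getD (i+1) 0) + 1) l.length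
          + (PySem.Int.floordiv t u + 1) := by
      induction l.length with
      | zero => simp [idxSum, List.range_succ]
      | succ k ih2 => rw [idxSum_succ, ih2, idxSum_succ]; ring
    simp only [List.length_cons, this, List.getD_cons_succ]
    ring

theorem added_idx (l : List Int) (t : Int) :
    addedCnt l t
      = idxSum (fun i => if PySem.Int.mod t (l.getD i 0) = 0 then (1:Int) else 0) l.length := by
  induction l with
  | nil => rfl
  | cons u xs ih =>
    rw [addedCnt_cons, ih]
    have : idxSum (fun i => if PySem.Int.mod t ((u :: xs).getD i 0) = 0 then (1:Int) else 0)
            (xs.length + 1)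
        = idxSum (fun i => if PySem.Int.mod t ((u :: xs).getD (i+1) 0) = 0 then (1:Int) else 0)
            xs.length + (if PySem.Int.mod t u = 0 then (1:Int) else 0) := by
      induction xs.length with
      | zero => simp [idxSum, List.range_succ]
      | succ k ih2 => rw [idxSum_succ, ih2, idxSum_succ]; ring
    simp only [List.length_cons, this, List.getD_cons_succ]
    ring

theorem foldl_ignore {S : Type} (g : S → S) (l : List Int) :
    ∀ st : S, l.foldl (fun st _ => g st) st = runSim g l.length st := by
  induction l with
  | nil => intro st; rfl
  | cons x xs ih => intro st; simp only [List.foldl_cons, List.length_cons, runSim, ih]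

theorem altBest_succ (nxt : List Int) (k : Nat) (hk : 1 ≤ k) :
    altBest nxt ((k : Int) + 1)
      = if PySem.List.pyGetD nxt (k : Int) 0 < PySem.List.pyGetD nxt (altBest nxt (k : Int)) 0
        then (k : Int) else altBest nxt (k : Int) := by
  unfold altBest
  rw [PySem.List.pyRange_one_succ_right (show (1:Int) ≤ (k : Int) by exact_mod_cast hk),
      List.foldl_append]
  simp

theorem altBest_spec (nxt : List Int) (L : Nat) (hL : 1 ≤ L) :
    ∃ b : Nat, altBest nxt (L : Int) = (b : Int) ∧ b < L ∧
      (∀ i, i < L → nxt.getD b 0 ≤ nxt.getD i 0) ∧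
      (∀ i, i < b → nxt.getD b 0 < nxt.getD i 0) := by
  induction L, hL using Nat.le_induction with
  | base =>
    refine ⟨0, ?_, by omega, ?_, by omega⟩
    · unfold altBest
      rw [PySem.List.pyRange_one_eq_nil (by norm_num)]
      rfl
    · intro i hi
      have : i = 0 := by omega
      rw [this]
  | succ k hk ih =>
    obtain ⟨b, hb, hbk, hle, hlt⟩ := ih
    rw [show ((k + 1 : Nat) : Int) = (k : Int) + 1 by push_cast; ring,
        altBest_succ nxt k hk, hb, PySem.List.pyGetD_natCast, PySem.List.pyGetD_natCast]
    by_cases h : nxt.getD k 0 < nxt.getD b 0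
    · refine ⟨k, by rw [if_pos h], by omega, ?_, ?_⟩
      · intro i hi
        by_cases hik : i = k
        · rw [hik]
        · exact le_of_lt (lt_of_lt_of_le h (hle i (by omega)))
      · intro i hi
        exact lt_of_lt_of_le h (hle i (by omega))
    · refine ⟨b, by rw [if_neg h], by omega, ?_, hlt⟩
      intro i hi
      by_cases hik : i = k
      · rw [hik]; omega
      · exact hle i (by omega)

-- the dispatched event at a minimal frontier entry has exactly j earlier events
theorem pop_char (ts nxt : List Int) (j : Int)
    (hpos : ∀ i, i < ts.length → 1 ≤ ts.getD i 0)
    (hval : ∀ i, i < ts.length → 0 ≤ nxt.getD i 0 ∧ ts.getD i 0 ∣ nxt.getD i 0)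
    (hstair : ∀ i i', i < ts.length → i' < ts.length → ts.getD i' 0 ≤ nxt.getD i' 0 →
        nxt.getD i' 0 - ts.getD i' 0 < nxt.getD i 0 ∨
        (nxt.getD i' 0 - ts.getD i' 0 = nxt.getD i 0 ∧ i' < i))
    (hsum : idxSum (fun i => nxt.getD i 0 / ts.getD i 0) ts.length = j)
    (b : Nat) (hb : b < ts.length)
    (hle : ∀ i, i < ts.length → nxt.getD b 0 ≤ nxt.getD i 0)
    (hlt : ∀ i, i < b → nxt.getD b 0 < nxt.getD i 0) :
    altCapacity ts (nxt.getD b 0 - 1) + addedCnt (ts.take b) (nxt.getD b 0) = j := by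
  set t := nxt.getD b 0 with htdef
  have ht0 : 0 ≤ t := (hval b hb).1
  have key : ∀ i, i < ts.length → nxt.getD i 0 / ts.getD i 0
      = (t - 1) / ts.getD i 0 + 1 + (if i < b ∧ ts.getD i 0 ∣ t then 1 else 0) := by
    intro i hi
    set u := ts.getD i 0 with hudef
    have hu : 1 ≤ u := hpos i hi
    obtain ⟨hnn, hdvd⟩ := hval i hi
    set q := nxt.getD i 0 / u with hqdef
    have hqu : q * u = nxt.getD i 0 := Int.ediv_mul_cancel hdvd
    have hq0 : 0 ≤ q := Int.ediv_nonneg hnn (by omega)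
    by_cases hib : i < b
    · have htlt : t < q * u := by rw [hqu]; exact hlt i hib
      have hq1 : 1 ≤ q := by nlinarith
      have hst0 := hstair b i hb hi (by rw [← hqu]; nlinarith)
      have hst : q * u - u < t ∨ (q * u - u = t ∧ i < b) := by
        rw [hqu]; exact hst0
      have hge : (q - 1) * u ≤ t := by
        rcases hst with h | ⟨h, _⟩ <;> nlinarith
      by_cases hdv : u ∣ t
      · obtain ⟨c, hc⟩ := hdv
        have hc1 : q - 1 ≤ c := by
          have : (q - 1) * u ≤ c * u := by rw [mul_comm c u, ← hc]; exact hge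
          exact le_of_mul_le_mul_right this (by omega)
        have hc2 : c < q := by
          have : c * u < q * u := by rw [mul_comm c u, ← hc]; exact htlt
          exact lt_of_mul_lt_mul_right this (by omega)
        have hcq : c = q - 1 := by omega
        have hteq : t = (q - 1) * u := by rw [hc, hcq]; ring
        rw [if_pos ⟨hib, ⟨c, hc⟩⟩,
            ediv_between u (q - 2) (t - 1) (by omega) (by nlinarith) (by nlinarith)]
        ring
      · have hne : t ≠ (q - 1) * u := fun h => hdv ⟨q - 1, by rw [h]; ring⟩
        have hgt : (q - 1) * u < t := lt_of_le_of_ne hge (Ne.symm hne)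
        rw [if_neg (fun hh => hdv hh.2),
            ediv_between u (q - 1) (t - 1) (by omega) (by omega) (by nlinarith)]
        ring
    · have hble : t ≤ q * u := by rw [hqu]; exact hle i hi
      rw [if_neg (fun hh => hib hh.1)]
      rcases eq_or_lt_of_le hq0 with hq | hq
      · have htz : t = 0 := by nlinarith
        rw [htz, ediv_between u (-1) (0 - 1 : Int) (by omega) (by nlinarith) (by nlinarith)]
        omega
      · have hst0 := hstair b i hb hi (by rw [← hqu]; nlinarith)
        have hst : q * u - u < t ∨ (q * u - u = t ∧ i < b) := by
          rw [hqu]; exact hst0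
        have hgt : (q - 1) * u < t := by
          rcases hst with h | ⟨_, h⟩
          · nlinarith
          · omega
        rw [ediv_between u (q - 1) (t - 1) (by omega) (by omega) (by nlinarith)]
        ring
  have hcap : altCapacity ts (t - 1)
      = idxSum (fun i => (t - 1) / ts.getD i 0 + 1) ts.length := by
    rw [cap_idx]
    exact idxSum_congr _ _ _ (fun i hi => by
      rw [PySem.Int.floordiv_eq_ediv_of_pos (by have := hpos i hi; omega)])
  have hadd : addedCnt (ts.take b) t
      = idxSum (fun i => if i < b ∧ ts.getD i 0 ∣ t then (1:Int) else 0) ts.length := by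
    rw [added_idx, List.length_take, Nat.min_eq_left (le_of_lt hb)]
    rw [idxSum_eq_of_zeros _ b ts.length (le_of_lt hb)
          (fun i h1 _ => by rw [if_neg (fun hh => absurd hh.1 (by omega))])]
    exact idxSum_congr _ _ _ (fun i hi => by
      rw [getD_take ts b i hi]
      by_cases hdv : ts.getD i 0 ∣ t
      · rw [if_pos ((PySem.Int.mod_eq_zero_iff_dvd t _).mpr hdv), if_pos ⟨hi, hdv⟩]
      · rw [if_neg (fun hh => hdv ((PySem.Int.mod_eq_zero_iff_dvd t _).mp hh)),
            if_neg (fun hh => hdv hh.2)])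
  rw [hcap, hadd, ← idxSum_add, ← hsum]
  exact idxSum_congr _ _ _ (fun i hi => (key i hi).symm)

-- one simulation step: what it does and that it preserves the invariant
theorem step_all (ts nxt : List Int) (j last : Int)
    (hpos : ∀ i, i < ts.length → 1 ≤ ts.getD i 0) (hL : 1 ≤ ts.length)
    (hInv : SimInv ts j nxt) :
    ∃ b : Nat, b < ts.length ∧
      altStep ts (ts.length : Int) (nxt, last)
        = (nxt.set b (nxt.getD b 0 + ts.getD b 0), (b : Int)) ∧
      SimInv ts (j + 1) (nxt.set b (nxt.getD b 0 + ts.getD b 0)) ∧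
      PySem.Int.mod (nxt.getD b 0) (ts.getD b 0) = 0 ∧
      0 ≤ nxt.getD b 0 ∧
      altCapacity ts (nxt.getD b 0 - 1) + addedCnt (ts.take b) (nxt.getD b 0) = j := by
  obtain ⟨hlen, hval, hstair, hsum⟩ := hInv
  obtain ⟨b, hbeq, hb, hle, hlt⟩ := altBest_spec nxt ts.length hL
  have hbn : b < nxt.length := by omega
  have hub : 1 ≤ ts.getD b 0 := hpos b hb
  refine ⟨b, hb, ?_, ?_, ?_, (hval b hb).1, pop_char ts nxt j hpos hval hstair hsum b hb hle hlt⟩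
  · unfold altStep
    rw [hbeq]
    simp [PySem.List.pySetD_natCast, PySem.List.pyGetD_natCast]
  · set t := nxt.getD b 0 with htdef
    have ht0 : 0 ≤ t := (hval b hb).1
    have hget : ∀ i : Nat, (nxt.set b (t + ts.getD b 0)).getD i 0
        = if i = b then t + ts.getD b 0 else nxt.getD i 0 :=
      fun i => getD_set_lt nxt b i _ hbn
    refine ⟨by rw [List.length_set]; exact hlen, ?_, ?_, ?_⟩
    · intro i hi
      rw [hget i]
      by_cases h : i = b
      · rw [if_pos h, h]
        exact ⟨by omega, dvd_add (hval b hb).2 dvd_rfl⟩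
      · rw [if_neg h]; exact hval i hi
    · intro i i' hi hi'
      rw [hget i, hget i']
      by_cases h' : i' = b
      · rw [if_pos h', h']
        intro _
        by_cases h : i = b
        · rw [if_pos h, h]
          left; omega
        · rw [if_neg h]
          have h1 := hle i hi
          rcases lt_or_eq_of_le h1 with h2 | h2
          · left; omega
          · right
            refine ⟨by omega, ?_⟩
            by_cases hib : i < b
            · exfalso; have := hlt i hib; omega
            · omega
      · rw [if_neg h']
        intro hcond
        have hst := hstair i i' hi hi' hcond
        by_cases h : i = b
        · rw [if_pos h]
          rw [h] at hst
          left
          rcases hst with h2 | ⟨h2, _⟩ <;> omega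
        · rw [if_neg h]; exact hst
    · have hstep : ∀ i, i < ts.length →
          (nxt.set b (t + ts.getD b 0)).getD i 0 / ts.getD i 0
            = nxt.getD i 0 / ts.getD i 0 + (if i = b then 1 else 0) := by
        intro i hi
        rw [hget i]
        by_cases h : i = b
        · rw [if_pos h, if_pos h, h]
          rw [show t + ts.getD b 0 = t + 1 * ts.getD b 0 by ring,
              Int.add_mul_ediv_right _ _ (by omega : ts.getD b 0 ≠ 0)]
        · rw [if_neg h, if_neg h]; ring
      rw [idxSum_congr _ _ _ hstep, idxSum_add, hsum, idxSum_ite_eq b ts.length hb]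
  · exact (PySem.Int.mod_eq_zero_iff_dvd _ _).mpr (hval b hb).2

-- running the simulation k ≥ 1 more steps from an invariant state
theorem run_good (ts : List Int)
    (hpos : ∀ i, i < ts.length → 1 ≤ ts.getD i 0) (hL : 1 ≤ ts.length) :
    ∀ (k : Nat) (j : Int) (nxt : List Int) (last : Int), 1 ≤ k → SimInv ts j nxt →
    ∃ (b : Nat) (t : Int),
      (runSim (altStep ts (ts.length : Int)) k (nxt, last)).2 = (b : Int) ∧
      b < ts.length ∧ 0 ≤ t ∧ PySem.Int.mod t (ts.getD b 0) = 0 ∧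
      altCapacity ts (t - 1) + addedCnt (ts.take b) t = j + (k : Int) - 1 := by
  intro k
  induction k with
  | zero => intro j nxt last hk; omega
  | succ k ih =>
    intro j nxt last _ hInv
    obtain ⟨b, hb, hstep, hInv', hmod, ht0, hchar⟩ := step_all ts nxt j last hpos hL hInv
    match k, ih with
    | 0, _ =>
      refine ⟨b, nxt.getD b 0, ?_, hb, ht0, hmod, by push_cast; omega⟩
      show (runSim (altStep ts (ts.length : Int)) 0 (altStep ts (ts.length : Int) (nxt, last))).2 = _
      rw [hstep]
      rfl
    | k + 1, ih =>
      obtain ⟨b', t', hres, hb', ht0', hmod', hchar'⟩ :=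
        ih (j + 1) (nxt.set b (nxt.getD b 0 + ts.getD b 0)) (b : Int) (by omega) hInv'
      refine ⟨b', t', ?_, hb', ht0', hmod', by push_cast at hchar' ⊢; omega⟩
      show (runSim (altStep ts (ts.length : Int)) (k + 1)
              (altStep ts (ts.length : Int) (nxt, last))).2 = _
      rw [hstep]
      exact hres

theorem simInv_init (ts : List Int) (hpos : ∀ i, i < ts.length → 1 ≤ ts.getD i 0) :
    SimInv ts 0 (List.replicate ts.length 0) := by
  refine ⟨List.length_replicate, ?_, ?_, ?_⟩
  · intro i hi
    rw [getD_replicate_zero]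
    exact ⟨le_rfl, dvd_zero _⟩
  · intro i i' hi hi' hcond
    rw [getD_replicate_zero] at hcond
    have := hpos i' hi'
    omega
  · rw [idxSum_zero]
    intro i hi
    rw [getD_replicate_zero, Int.zero_ediv]

theorem pick_at_index (ts : List Int) (t : Int) (b : Nat) (hb : b < ts.length)
    (hdv : PySem.Int.mod t (ts.getD b 0) = 0) :
    pick t (PySem.List.enumerate ts 0) (addedCnt (ts.take b) t + 1) = (b : Int) + 1 := by
  have hsplit : ts = ts.take b ++ ts[b] :: ts.drop (b + 1) := by
    conv_lhs => rw [← List.take_append_drop b ts]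
    rw [List.drop_eq_getElem_cons hb]
  have hgd : ts.getD b 0 = ts[b] := List.getD_eq_getElem ts 0 hb
  rw [hgd] at hdv
  have hlen : (0:Int) + ((ts.take b).length : Int) = (b : Int) := by
    rw [List.length_take, Nat.min_eq_left (le_of_lt hb)]; ring
  have henum : PySem.List.enumerate ts 0
      = PySem.List.enumerate (ts.take b) 0
        ++ ((b : Int), ts[b]) :: PySem.List.enumerate (ts.drop (b + 1)) ((b : Int) + 1) := by
    conv_lhs => rw [hsplit]
    rw [PySem.List.enumerate_append, PySem.List.enumerate_cons, hlen]
  rw [henum, ← mcnt_enumerate t (ts.take b) 0, pick_append_mid t _ _ _ _ hdv]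

-- ===== VERDICT proof =====
theorem solve_spec : Claim_equal_solve := by
  unfold Claim_equal_solve
  intro n m ts hdom hpre
  unfold Spec_solve
  by_cases hnm : n ≤ m
  · rw [solve, if_pos hnm, solve_alt, if_pos hnm]
  · rcases hpre with h | ⟨hm, hne, hposmem⟩
    · exact absurd h hnm
    have hposi : ∀ i, i < ts.length → 1 ≤ ts.getD i 0 := by
      intro i hi
      rw [List.getD_eq_getElem ts 0 hi]
      exact hposmem _ (List.getElem_mem hi)
    have hL : 1 ≤ ts.length := by
      rcases ts with _ | ⟨x, xs⟩
      · exact absurd rfl hne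
      · simp
    have hlen1 : 1 ≤ (ts.length : Int) := by exact_mod_cast hL
    have hmn : m < n := by omega
    -- evaluate B
    have hBval : ∃ b : Nat, b < ts.length ∧ solve_alt n m ts = (b : Int) + 1 ∧
        ∃ t : Int, 0 ≤ t ∧ PySem.Int.mod t (ts.getD b 0) = 0 ∧
          altCapacity ts (t - 1) + addedCnt (ts.take b) t = n - 1 := by
      rw [solve_alt, if_neg hnm]
      have hlen : (PySem.List.pyRange 0 n 1).length = n.toNat := by
        rw [PySem.List.length_pyRange_one]
        norm_num
      rw [foldl_ignore (altStep ts m) (PySem.List.pyRange 0 n 1), hlen]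
      rw [hm] at *
      have hmt : ((ts.length : Int)).toNat = ts.length := Int.toNat_natCast _
      rw [hmt]
      have hk1 : 1 ≤ n.toNat := by omega
      obtain ⟨b, t, hres, hb, ht0, hmod, hchar⟩ :=
        run_good ts hposi hL n.toNat 0 (List.replicate ts.length 0) 0 hk1
          (simInv_init ts hposi)
      refine ⟨b, hb, by rw [hres], t, ht0, hmod, ?_⟩
      rw [hchar]
      omega
    obtain ⟨b, hb, hBeq, t, ht0, hmod, hchar⟩ := hBval
    -- facts about t
    have hDnn : 0 ≤ addedCnt (ts.take b) t := addedCnt_nonneg _ _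
    have hPT' : altCapacity ts (t - 1) < n := by omega
    have hgd : ts.getD b 0 = ts[b] := List.getD_eq_getElem ts 0 hb
    have hPT : n ≤ altCapacity ts t := by
      have hpred := altCapacity_pred ts hposmem t
      have hsplitadd : addedCnt (ts.take b) t + 1 ≤ addedCnt ts t := by
        conv_rhs => rw [← List.take_append_drop b ts]
        rw [addedCnt_append, List.drop_eq_getElem_cons hb, addedCnt_cons]
        have h1 := addedCnt_nonneg (ts.drop (b + 1)) t
        rw [hgd] at hmod
        rw [if_pos hmod]
        omega
      omega
    have ht1 : 1 ≤ t := by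
      by_contra hc
      have htz : t = 0 := by omega
      have hcz : altCapacity ts (t - 1) = 0 := by
        rw [htz, cap_idx]
        apply idxSum_zero
        intro i hi
        have hu := hposi i hi
        rw [PySem.Int.floordiv_eq_ediv_of_pos (by omega),
            ediv_between (ts.getD i 0) (-1) (0 - 1 : Int) (by omega) (by nlinarith) (by nlinarith)]
        ring
      have hDle : addedCnt (ts.take b) t ≤ (b : Int) := by
        have := addedCnt_le_length (ts.take b) t
        rw [List.length_take, Nat.min_eq_left (le_of_lt hb)] at this
        exact this
      have : n ≤ (b : Int) + 1 := by omega
      have hbl : (b : Int) + 1 ≤ (ts.length : Int) := by exact_mod_cast hb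
      omega
    -- evaluate A
    obtain ⟨v, hv⟩ : ∃ v, PySem.List.max? ts (fun y => y) = some v := by
      rcases hmax : PySem.List.max? ts (fun y => y) with _ | v
      · exact absurd ((PySem.List.max?_eq_none_iff ts _).mp hmax) hne
      · exact ⟨v, rfl⟩
    have hvmem := PySem.List.max?_mem hv
    have hv1 : 1 ≤ v := hposmem v hvmem
    have hhi0 : 0 ≤ v * n := mul_nonneg (by omega) (by omega)
    have htle : t ≤ v * n := by
      by_contra hc
      have h1 : v * n ≤ t - 1 := by omega
      have h2 := altCapacity_mono ts hposmem (v * n) (t - 1) h1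
      have h3 := altCapacity_lower ts hposmem v hvmem n hhi0
      have hfd : PySem.Int.floordiv (v * n) v = n := by
        rw [PySem.Int.floordiv_eq_ediv_of_pos (by omega),
            Int.mul_ediv_cancel_left _ (by omega : v ≠ 0)]
      rw [hfd] at h3
      omega
    rw [solve, if_neg hnm]
    simp only [hv, Option.getD_some]
    rw [hm]
    rw [loopA_correct n ts hposmem t hPT hPT' 1 (v * n) 0 (by omega) (Or.inl htle)]
    rw [pickScan_pick]
    have hr : n - altCapacity ts (t - 1) = addedCnt (ts.take b) t + 1 := by omega
    rw [hr, pick_at_index ts t b hb hmod]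
    rw [← hm]
    exact hBeq.symm
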